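-- pv_equiv track=rewrite | github.com/MG-RA/quartz | irrev/irrev/commands/registry.py | _first_body_paragraph
-- ===== SOURCE A (Python) =====
-- def _first_body_paragraph(content: str) -> str | None:
--     lines = content.splitlines()
--     paras: list[str] = []
--     buf: list[str] = []
--     for line in lines:
--         if line.strip().startswith("#"):
--             continue
--         if not line.strip():
--             if buf:
--                 paras.append("\n".join(buf).strip())
--                 buf = []
--             continue
--         buf.append(line)
--     if buf:
--         paras.append("\n".join(buf).strip())
--     for para in paras:
--         if para and not para.startswith(">"):
--             return para
--     return None
-- ===== SOURCE B (Python) =====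
-- def _first_body_paragraph(content: str) -> str | None:
--     lines = [l for l in content.splitlines() if not l.strip().startswith("#")]
--     n = len(lines)
--     i = 0
--     while i < n:
--         if not lines[i].strip():
--             i += 1
--             continue
--         j = i
--         while j < n and lines[j].strip():
--             j += 1
--         para = "\n".join(lines[i:j]).strip()
--         if para and not para.startswith(">"):
--             return para
--         i = j
--     return None
-- ===== Notes on version B (the rewrite author's own statement) =====
-- stated objective: alternative
-- what changed: Replaces A's single stateful fold carrying a growing line buffer and a list of all paragraphs with a filter-first pass (headers removed up front) followed by an index-based block scan that slices each paragraph out and returns early at the first acceptable one, never materialising the paragraph list.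
import Mathlib
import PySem

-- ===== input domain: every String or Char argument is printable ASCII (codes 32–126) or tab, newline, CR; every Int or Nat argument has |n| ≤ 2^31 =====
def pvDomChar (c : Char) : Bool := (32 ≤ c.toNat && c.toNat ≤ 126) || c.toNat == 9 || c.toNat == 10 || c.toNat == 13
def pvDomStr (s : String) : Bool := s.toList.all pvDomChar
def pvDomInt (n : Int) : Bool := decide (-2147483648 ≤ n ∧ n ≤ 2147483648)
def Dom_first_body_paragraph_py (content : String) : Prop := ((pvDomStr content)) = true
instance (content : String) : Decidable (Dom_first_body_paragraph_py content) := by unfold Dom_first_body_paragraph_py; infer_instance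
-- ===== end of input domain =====

-- B replaces A's single stateful fold (line buffer + full paragraph list) by a
-- filter-first pass followed by an index-based block scan with early return
-- (objective: alternative decomposition, same asymptotic cost).

-- ===== PORT A =====
-- the loop body of A's first for-loop, as a fold step over (paras, buf)
def pvStepA (st : List String × List String) (line : String) : List String × List String :=
  if PySem.Str.startswith (PySem.Str.strip line) "#" = true then st
  else if PySem.Str.strip line = "" then
    if st.2 ≠ [] then (st.1 ++ [PySem.Str.strip (PySem.Str.join "\n" st.2)], []) else st
  else (st.1, st.2 ++ [line])

-- A's second for-loop: first paragraph that is non-empty and not a blockquote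
def pvFirstA : List String → Option String
  | [] => none
  | p :: rest =>
    if p ≠ "" ∧ PySem.Str.startswith p ">" = false then some p else pvFirstA rest

def first_body_paragraph_py (content : String) : Option String :=
  let lines := PySem.Str.splitlines content
  let st := lines.foldl pvStepA ([], [])
  let paras := if st.2 ≠ [] then st.1 ++ [PySem.Str.strip (PySem.Str.join "\n" st.2)] else st.1
  pvFirstA paras

-- ===== PORT B =====
def pvKeep (l : String) : Bool := !(PySem.Str.startswith (PySem.Str.strip l) "#")

-- inner while: advance j while j < n and lines[j].strip(); fuel n - j makes the loop structural
def pvBlockEndGo (lines : List String) (n : Nat) : Nat → Nat → Nat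
  | 0, j => j
  | fuel + 1, j =>
    if j < n ∧ PySem.Str.strip (lines.getD j "") ≠ "" then pvBlockEndGo lines n fuel (j + 1)
    else j

def pvBlockEnd (lines : List String) (n j : Nat) : Nat :=
  pvBlockEndGo lines n (n - j) j

-- outer while over the index i; fuel n - i makes the loop structural
def pvScanGo (lines : List String) (n : Nat) : Nat → Nat → Option String
  | 0, _ => none
  | fuel + 1, i =>
    if i < n then
      if PySem.Str.strip (lines.getD i "") = "" then pvScanGo lines n fuel (i + 1)
      else
        let j := pvBlockEnd lines n i
        let para := PySem.Str.strip (PySem.Str.join "\n"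
          (PySem.List.slice lines (some (i : Int)) (some (j : Int))))
        if para ≠ "" ∧ PySem.Str.startswith para ">" = false then some para
        else pvScanGo lines n fuel j
    else none

def first_body_paragraph_py_alt (content : String) : Option String :=
  let lines := (PySem.Str.splitlines content).filter pvKeep
  pvScanGo lines lines.length lines.length 0

-- ===== PRECONDITION & SPEC =====
def Spec_first_body_paragraph_py (content : String) (out : Option String) : Prop := out = first_body_paragraph_py_alt content
instance (content : String) (out : Option String) : Decidable (Spec_first_body_paragraph_py content out) := by unfold Spec_first_body_paragraph_py; infer_instance

-- ===== CLAIM (what is proved, stated in full; the proofs are below) =====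
def Claim_equal_first_body_paragraph_py : Prop := ∀ (content : String), Dom_first_body_paragraph_py content → Spec_first_body_paragraph_py content (first_body_paragraph_py content)

-- ===== LEMMAS AND PROOFS =====

-- the non-blank predicate, Bool form
def pvNB (l : String) : Bool := decide (PySem.Str.strip l ≠ "")

-- list-level version of B's outer loop
def pvScanL : List String → Option String
  | [] => none
  | l :: ls =>
    if PySem.Str.strip l = "" then pvScanL ls
    else
      let para := PySem.Str.strip (PySem.Str.join "\n" ((l :: ls).takeWhile pvNB))
      if para ≠ "" ∧ PySem.Str.startswith para ">" = false then some para
      else pvScanL (ls.dropWhile pvNB)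
termination_by ls => ls.length
decreasing_by
  · simp
  · have := List.length_dropWhile_le pvNB ls; simp; omega

-- paragraphs A's fold will still emit, given current buffer and remaining lines
def pvParasFrom (buf : List String) : List String → List String
  | [] => if buf ≠ [] then [PySem.Str.strip (PySem.Str.join "\n" buf)] else []
  | l :: ls =>
    if pvKeep l = false then pvParasFrom buf ls
    else if PySem.Str.strip l = "" then
      if buf ≠ [] then PySem.Str.strip (PySem.Str.join "\n" buf) :: pvParasFrom [] ls
      else pvParasFrom buf ls
    else pvParasFrom (buf ++ [l]) ls

theorem pvFold_eq_parasFrom (ls : List String) :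
    ∀ (paras buf : List String),
      (if (ls.foldl pvStepA (paras, buf)).2 ≠ [] then
        (ls.foldl pvStepA (paras, buf)).1
          ++ [PySem.Str.strip (PySem.Str.join "\n" (ls.foldl pvStepA (paras, buf)).2)]
       else (ls.foldl pvStepA (paras, buf)).1)
      = paras ++ pvParasFrom buf ls := by
  induction ls with
  | nil =>
    intro paras buf
    by_cases h : buf = [] <;> simp [pvParasFrom, h]
  | cons l ls ih =>
    intro paras buf
    rw [List.foldl_cons]
    by_cases hdr : PySem.Str.startswith (PySem.Str.strip l) "#" = true
    · have hk : pvKeep l = false := by unfold pvKeep; rw [hdr]; rfl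
      have hstep : pvStepA (paras, buf) l = (paras, buf) := by
        unfold pvStepA; rw [if_pos hdr]
      have hpf : pvParasFrom buf (l :: ls) = pvParasFrom buf ls := by
        conv_lhs => rw [pvParasFrom]
        rw [if_pos hk]
      rw [hstep, hpf, ih]
    · have hdr' : PySem.Str.startswith (PySem.Str.strip l) "#" = false := by
        simpa using hdr
      have hk : pvKeep l = true := by unfold pvKeep; rw [hdr']; rfl
      have hk' : ¬ (pvKeep l = false) := by rw [hk]; simp
      by_cases hb : PySem.Str.strip l = ""
      · by_cases hbuf : buf = []
        · have hstep : pvStepA (paras, buf) l = (paras, buf) := by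
            unfold pvStepA; rw [if_neg (by rw [hdr']; simp), if_pos hb, if_neg (by simp [hbuf])]
          have hpf : pvParasFrom buf (l :: ls) = pvParasFrom buf ls := by
            conv_lhs => rw [pvParasFrom]
            rw [if_neg hk', if_pos hb, if_neg (by simp [hbuf])]
          rw [hstep, hpf, ih]
        · have hstep : pvStepA (paras, buf) l
              = (paras ++ [PySem.Str.strip (PySem.Str.join "\n" buf)], []) := by
            unfold pvStepA; rw [if_neg (by rw [hdr']; simp), if_pos hb, if_pos hbuf]
          have hpf : pvParasFrom buf (l :: ls)
              = PySem.Str.strip (PySem.Str.join "\n" buf) :: pvParasFrom [] ls := by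
            conv_lhs => rw [pvParasFrom]
            rw [if_neg hk', if_pos hb, if_pos hbuf]
          rw [hstep, hpf, ih]
          simp
      · have hstep : pvStepA (paras, buf) l = (paras, buf ++ [l]) := by
          unfold pvStepA; rw [if_neg (by rw [hdr']; simp), if_neg hb]
        have hpf : pvParasFrom buf (l :: ls) = pvParasFrom (buf ++ [l]) ls := by
          conv_lhs => rw [pvParasFrom]
          rw [if_neg hk', if_neg hb]
        rw [hstep, hpf, ih]

theorem pvParasFrom_filter (ls : List String) :
    ∀ buf, pvParasFrom buf (ls.filter pvKeep) = pvParasFrom buf ls := by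
  induction ls with
  | nil => intro buf; rfl
  | cons l ls ih =>
    intro buf
    by_cases hk : pvKeep l = true
    · rw [List.filter_cons_of_pos hk]
      simp only [pvParasFrom, hk]
      by_cases hb : PySem.Str.strip l = ""
      · by_cases hbuf : buf = [] <;> simp [hb, hbuf, ih]
      · simp [hb, ih]
    · simp only [Bool.not_eq_true] at hk
      rw [List.filter_cons_of_neg (by simp [hk])]
      simp [pvParasFrom, hk, ih]

theorem pvParasFrom_nonempty (buf : List String) (ls : List String)
    (hbuf : buf ≠ []) (hall : ∀ l ∈ ls, pvKeep l = true) :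
    pvParasFrom buf ls
      = PySem.Str.strip (PySem.Str.join "\n" (buf ++ ls.takeWhile pvNB))
        :: pvParasFrom [] (ls.dropWhile pvNB) := by
  induction ls generalizing buf with
  | nil => simp [pvParasFrom, hbuf]
  | cons l ls ih =>
    have hk : pvKeep l = true := hall l (by simp)
    have hk' : ¬ (pvKeep l = false) := by rw [hk]; simp
    by_cases hb : PySem.Str.strip l = ""
    · have hnb : pvNB l = false := by simp [pvNB, hb]
      have e1 : (l :: ls).takeWhile pvNB = [] := by simp [hnb]
      have e2 : (l :: ls).dropWhile pvNB = l :: ls := by simp [hnb]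
      have e3 : pvParasFrom [] (l :: ls) = pvParasFrom [] ls := by
        conv_lhs => rw [pvParasFrom]
        rw [if_neg hk', if_pos hb, if_neg (by simp)]
      conv_lhs => rw [pvParasFrom]
      rw [if_neg hk', if_pos hb, if_pos hbuf, e1, e2, e3]
      simp
    · have hnb : pvNB l = true := by simp [pvNB, hb]
      have e1 : (l :: ls).takeWhile pvNB = l :: ls.takeWhile pvNB := by
        simp [hnb]
      have e2 : (l :: ls).dropWhile pvNB = ls.dropWhile pvNB := by
        simp [hnb]
      conv_lhs => rw [pvParasFrom]
      rw [if_neg hk', if_neg hb]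
      rw [ih (buf ++ [l]) (by simp) (fun x hx => hall x (by simp [hx]))]
      rw [e1, e2]
      simp

theorem pvScanL_eq_firstA (ls : List String) (hall : ∀ l ∈ ls, pvKeep l = true) :
    pvScanL ls = pvFirstA (pvParasFrom [] ls) := by
  fun_induction pvScanL ls with
  | case1 => rfl
  | case2 l ls hb ih =>
    have hk : pvKeep l = true := hall l (by simp)
    rw [ih (fun x hx => hall x (by simp [hx]))]
    conv_rhs => rw [pvParasFrom]
    rw [if_neg (by rw [hk]; simp), if_pos hb, if_neg (by simp)]
  | case3 l ls hb para hgood =>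
    have hk : pvKeep l = true := hall l (by simp)
    have hnb : pvNB l = true := by simp [pvNB, hb]
    have htw : l :: ls.takeWhile pvNB = (l :: ls).takeWhile pvNB := by
      simp [hnb]
    have hpe : para = PySem.Str.strip (PySem.Str.join "\n" ((l :: ls).takeWhile pvNB)) := rfl
    conv_rhs => rw [pvParasFrom]
    rw [if_neg (by rw [hk]; simp), if_neg hb, List.nil_append]
    rw [pvParasFrom_nonempty [l] ls (by simp) (fun x hx => hall x (by simp [hx]))]
    rw [pvFirstA, List.singleton_append, htw, ← hpe]
    rw [if_pos hgood]
  | case4 l ls hb para hgood ih =>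
    have hk : pvKeep l = true := hall l (by simp)
    have hnb : pvNB l = true := by simp [pvNB, hb]
    have htw : l :: ls.takeWhile pvNB = (l :: ls).takeWhile pvNB := by
      simp [hnb]
    have hpe : para = PySem.Str.strip (PySem.Str.join "\n" ((l :: ls).takeWhile pvNB)) := rfl
    conv_rhs => rw [pvParasFrom]
    rw [if_neg (by rw [hk]; simp), if_neg hb, List.nil_append]
    rw [pvParasFrom_nonempty [l] ls (by simp) (fun x hx => hall x (by simp [hx]))]
    rw [pvFirstA, List.singleton_append, htw, ← hpe]
    rw [if_neg hgood]
    have hsub : List.Sublist (List.dropWhile pvNB ls) ls := List.dropWhile_sublist _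
    exact ih (fun x hx => hall x (List.mem_cons_of_mem l (hsub.subset hx)))

theorem pvDropLenTakeWhile {α : Type} (p : α → Bool) (l : List α) :
    l.drop (l.takeWhile p).length = l.dropWhile p := by
  induction l with
  | nil => rfl
  | cons a l ih => by_cases h : p a <;> simp [h, ih]

theorem pvBlockEndGo_eq (lines : List String) (fuel : Nat) :
    ∀ j, lines.length - j ≤ fuel →
      pvBlockEndGo lines lines.length fuel j = j + ((lines.drop j).takeWhile pvNB).length := by
  induction fuel with
  | zero =>
    intro j hj
    have hd : lines.drop j = [] := List.drop_eq_nil_of_le (by omega)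
    rw [pvBlockEndGo, hd]
    simp
  | succ fuel ih =>
    intro j hj
    rw [pvBlockEndGo]
    by_cases h : j < lines.length ∧ PySem.Str.strip (lines.getD j "") ≠ ""
    · obtain ⟨hlt, hs⟩ := h
      have hd : lines.drop j = lines[j] :: lines.drop (j + 1) :=
        List.drop_eq_getElem_cons hlt
      have hg : lines.getD j "" = lines[j] := by
        rw [List.getD_eq_getElem?_getD, List.getElem?_eq_getElem hlt, Option.getD_some]
      have hs' : PySem.Str.strip lines[j] ≠ "" := by rw [← hg]; exact hs
      have hnb : pvNB lines[j] = true := by simp [pvNB, hs']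
      rw [if_pos ⟨hlt, hs⟩, ih (j + 1) (by omega), hd, List.takeWhile_cons, hnb]
      simp; omega
    · rw [if_neg h]
      by_cases hlt : j < lines.length
      · have hs : PySem.Str.strip (lines.getD j "") = "" := by tauto
        have hd : lines.drop j = lines[j] :: lines.drop (j + 1) :=
          List.drop_eq_getElem_cons hlt
        have hg : lines.getD j "" = lines[j] := by
          rw [List.getD_eq_getElem?_getD, List.getElem?_eq_getElem hlt, Option.getD_some]
        have hs' : PySem.Str.strip lines[j] = "" := by rw [← hg]; exact hs
        have hnb : pvNB lines[j] = false := by simp [pvNB, hs']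
        rw [hd, List.takeWhile_cons, hnb]
        simp
      · have hd : lines.drop j = [] := List.drop_eq_nil_of_le (by omega)
        simp [hd]

theorem pvBlockEnd_eq (lines : List String) (j : Nat) :
    pvBlockEnd lines lines.length j = j + ((lines.drop j).takeWhile pvNB).length :=
  pvBlockEndGo_eq lines (lines.length - j) j (by omega)

theorem pvScanGo_eq_scanL (lines : List String) (fuel : Nat) :
    ∀ i, lines.length - i ≤ fuel →
      pvScanGo lines lines.length fuel i = pvScanL (lines.drop i) := by
  induction fuel with
  | zero =>
    intro i hi
    have hd : lines.drop i = [] := List.drop_eq_nil_of_le (by omega)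
    rw [pvScanGo, hd, pvScanL]
  | succ fuel ih =>
    intro i hfuel
    rw [pvScanGo]
    by_cases hi : i < lines.length
    · rw [if_pos hi]
      have hd : lines.drop i = lines[i] :: lines.drop (i + 1) :=
        List.drop_eq_getElem_cons hi
      have hg : lines.getD i "" = lines[i] := by
        rw [List.getD_eq_getElem?_getD, List.getElem?_eq_getElem hi, Option.getD_some]
      by_cases hb : PySem.Str.strip (lines.getD i "") = ""
      · rw [if_pos hb, ih (i + 1) (by omega), hd, pvScanL,
          if_pos (show PySem.Str.strip lines[i] = "" by rw [← hg]; exact hb)]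
      · rw [if_neg hb]
        have hb' : ¬ PySem.Str.strip lines[i] = "" := by rw [← hg]; exact hb
        have hnb : pvNB lines[i] = true := by simp [pvNB, hb']
        have hbe := pvBlockEnd_eq lines i
        have htw1 : 1 ≤ ((lines.drop i).takeWhile pvNB).length := by
          rw [hd, List.takeWhile_cons, hnb]
          simp
        have hsl : PySem.List.slice lines (some (i : Int))
              (some ((pvBlockEnd lines lines.length i : Nat) : Int))
            = (lines.drop i).takeWhile pvNB := by
          rw [PySem.List.slice_natCast, hbe]
          have h2 : i + ((lines.drop i).takeWhile pvNB).length - i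
              = ((lines.drop i).takeWhile pvNB).length := by omega
          rw [h2]
          exact (List.prefix_iff_eq_take.mp (List.takeWhile_prefix pvNB)).symm
        have hdropdrop : lines.drop (pvBlockEnd lines lines.length i)
            = (lines.drop (i + 1)).dropWhile pvNB := by
          rw [hbe, ← List.drop_drop, pvDropLenTakeWhile, hd, List.dropWhile_cons, hnb]
          simp
        have htwlen : ((lines.drop i).takeWhile pvNB).length ≤ (lines.drop i).length :=
          List.Sublist.length_le (List.takeWhile_sublist _)
        have hfj : lines.length - pvBlockEnd lines lines.length i ≤ fuel := by
          have := List.length_drop (l := lines) (i := i)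
          omega
        simp only []
        rw [hsl]
        conv_rhs => rw [hd, pvScanL]
        rw [if_neg hb']
        simp only [← hd]
        by_cases hgood : PySem.Str.strip (PySem.Str.join "\n" ((lines.drop i).takeWhile pvNB)) ≠ ""
            ∧ PySem.Str.startswith
              (PySem.Str.strip (PySem.Str.join "\n" ((lines.drop i).takeWhile pvNB))) ">" = false
        · rw [if_pos hgood, if_pos hgood]
        · rw [if_neg hgood, if_neg hgood, ih (pvBlockEnd lines lines.length i) hfj, hdropdrop]
    · rw [if_neg hi, List.drop_eq_nil_of_le (by omega), pvScanL]

-- ===== VERDICT (by name: the statement is the Claim_ definition above) =====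
theorem first_body_paragraph_py_spec : Claim_equal_first_body_paragraph_py := by
  intro content _
  unfold Spec_first_body_paragraph_py first_body_paragraph_py first_body_paragraph_py_alt
  simp only []
  rw [pvScanGo_eq_scanL _ _ 0 (by omega), List.drop_zero,
    pvScanL_eq_firstA _ (fun l hl => (List.mem_filter.mp hl).2),
    pvParasFrom_filter,
    pvFold_eq_parasFrom (PySem.Str.splitlines content) [] [], List.nil_append]
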